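-- pv_equiv track=rewrite | github.com/johnkespitia/flow-sdd-orchestrator-boilerplate | flowctl/multiagent.py | _semantic_locks
-- ===== SOURCE A (Python) =====
-- def _semantic_locks(slice_payload: dict[str, object]) -> list[str]:
--     declared = [str(item).strip() for item in slice_payload.get("semantic_locks", []) if str(item).strip()]
--     if declared:
--         return sorted(set(declared))
--     inferred: set[str] = set()
--     targets = [str(item) for item in slice_payload.get("owned_targets", []) if str(item).strip()]
--     for target in targets:
--         normalized = target.lower()
--         if "migrations" in normalized:
--             inferred.add("db:migrations")
--         if "/api/" in normalized or "routes" in normalized: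
--             inferred.add("api:routes")
--         if "contract" in normalized:
--             inferred.add("contracts:schema")
--     return sorted(inferred)
-- ===== SOURCE B (Python) =====
-- _RULES = (
--     ("api:routes", ("/api/", "routes")),
--     ("contracts:schema", ("contract",)),
--     ("db:migrations", ("migrations",)),
-- )
--
-- def _semantic_locks(slice_payload: dict[str, object]) -> list[str]:
--     declared = [str(item).strip() for item in slice_payload.get("semantic_locks", []) if str(item).strip()]
--     if declared:
--         return sorted(set(declared))
--     texts = [str(item).lower() for item in slice_payload.get("owned_targets", []) if str(item).strip()]
--     return [tag for tag, needles in _RULES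
--             if any(needle in text for text in texts for needle in needles)]
-- ===== Notes on version B (the rewrite author's own statement) =====
-- stated objective: alternative
-- what changed: The inference path drops the per-target if-chain and the set+sort entirely: B loops over a rule table in the tags' sorted order and emits each tag whose trigger substrings occur in any lowered target, building the output directly in order with no set and no sort.
import Mathlib
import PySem

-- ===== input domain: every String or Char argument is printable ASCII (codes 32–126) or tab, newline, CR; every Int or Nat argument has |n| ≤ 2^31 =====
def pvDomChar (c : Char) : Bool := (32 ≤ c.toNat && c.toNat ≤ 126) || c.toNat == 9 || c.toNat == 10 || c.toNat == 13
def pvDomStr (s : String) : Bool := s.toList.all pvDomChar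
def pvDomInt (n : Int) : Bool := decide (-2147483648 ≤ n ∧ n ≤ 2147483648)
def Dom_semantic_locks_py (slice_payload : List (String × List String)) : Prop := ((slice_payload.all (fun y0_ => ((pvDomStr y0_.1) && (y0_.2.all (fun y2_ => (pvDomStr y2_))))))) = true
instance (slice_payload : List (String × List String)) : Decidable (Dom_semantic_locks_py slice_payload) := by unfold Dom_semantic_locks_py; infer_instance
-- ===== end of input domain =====

-- B's inference path replaces A's per-target if-chain plus set-and-sort by a single pass over a
-- rule table in the tags' sorted order, emitting each triggered tag directly (no set, no sort).


-- ===== PORT A =====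
-- A's loop body, named: per-target normalization and the three if-adds
def pvLoopBody (inferred : PySem.Set String) (target : String) : PySem.Set String :=
  let normalized := PySem.Str.lower target
  let inferred := if PySem.Str.isIn "migrations" normalized then PySem.Set.add inferred "db:migrations" else inferred
  let inferred := if PySem.Str.isIn "/api/" normalized || PySem.Str.isIn "routes" normalized then PySem.Set.add inferred "api:routes" else inferred
  if PySem.Str.isIn "contract" normalized then PySem.Set.add inferred "contracts:schema" else inferred

-- literal port of A: list comprehension `declared`, early return, then the per-target loop
-- accumulating into a set, finally sorted.
def semantic_locks_py (slice_payload : List (String × List String)) : List String :=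
  let declared : List String :=
    (PySem.Dict.getD (PySem.Dict.mk slice_payload) "semantic_locks" []).filterMap
      (fun item => let s := PySem.Str.strip item; if s ≠ "" then some s else none)
  if declared ≠ [] then
    PySem.List.sorted (PySem.Set.ofList declared) (fun x => x) false
  else
    let targets : List String :=
      (PySem.Dict.getD (PySem.Dict.mk slice_payload) "owned_targets" []).filter
        (fun item => PySem.Str.strip item ≠ "")
    let inferred : PySem.Set String := targets.foldl pvLoopBody PySem.Set.empty
    PySem.List.sorted inferred (fun x => x) false

-- ===== PORT B =====
-- the rule table of Source B, in the tags' sorted order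
def pvRules : List (String × List String) :=
  [("api:routes", ["/api/", "routes"]),
   ("contracts:schema", ["contract"]),
   ("db:migrations", ["migrations"])]

-- literal port of B: same declared path, then a comprehension over the rule table emitting each
-- tag whose needles hit any lowered target — output built directly in order, no set, no sort.
def semantic_locks_py_alt (slice_payload : List (String × List String)) : List String :=
  let declared : List String :=
    (PySem.Dict.getD (PySem.Dict.mk slice_payload) "semantic_locks" []).filterMap
      (fun item => let s := PySem.Str.strip item; if s ≠ "" then some s else none)
  if declared ≠ [] then
    PySem.List.sorted (PySem.Set.ofList declared) (fun x => x) false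
  else
    let texts : List String :=
      (PySem.Dict.getD (PySem.Dict.mk slice_payload) "owned_targets" []).filterMap
        (fun item => if PySem.Str.strip item ≠ "" then some (PySem.Str.lower item) else none)
    pvRules.filterMap (fun r =>
      if texts.any (fun t => r.2.any (fun n => PySem.Str.isIn n t)) then some r.1 else none)

-- ===== PRECONDITION & SPEC =====
def Spec_semantic_locks_py (slice_payload : List (String × List String)) (out : List String) : Prop := out = semantic_locks_py_alt slice_payload
instance (slice_payload : List (String × List String)) (out : List String) : Decidable (Spec_semantic_locks_py slice_payload out) := by unfold Spec_semantic_locks_py; infer_instance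

-- ===== CLAIM (what is proved, stated in full; the proofs are below) =====
def Claim_equal_semantic_locks_py : Prop := ∀ (slice_payload : List (String × List String)), Dom_semantic_locks_py slice_payload → Spec_semantic_locks_py slice_payload (semantic_locks_py slice_payload)

-- ===== LEMMAS AND PROOFS =====
set_option maxHeartbeats 1000000

-- A's loop body with the lowering factored out
def pvStep (s : PySem.Set String) (n : String) : PySem.Set String :=
  let s := if PySem.Str.isIn "migrations" n then PySem.Set.add s "db:migrations" else s
  let s := if PySem.Str.isIn "/api/" n || PySem.Str.isIn "routes" n then PySem.Set.add s "api:routes" else s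
  if PySem.Str.isIn "contract" n then PySem.Set.add s "contracts:schema" else s

theorem pv_nodup_step (s : PySem.Set String) (n : String) (hs : s.Nodup) : (pvStep s n).Nodup := by
  unfold pvStep
  split_ifs <;>
    first
    | exact hs
    | exact PySem.Set.nodup_add _ _ hs
    | exact PySem.Set.nodup_add _ _ (PySem.Set.nodup_add _ _ hs)
    | exact PySem.Set.nodup_add _ _ (PySem.Set.nodup_add _ _ (PySem.Set.nodup_add _ _ hs))

theorem pv_nodup_foldl (L : List String) (s : PySem.Set String) (hs : s.Nodup) :
    (L.foldl pvStep s).Nodup := by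
  induction L generalizing s with
  | nil => exact hs
  | cons a t ih => exact ih _ (pv_nodup_step s a hs)

theorem pv_mem_step (s : PySem.Set String) (n x : String) :
    x ∈ pvStep s n ↔ x ∈ s
      ∨ (x = "db:migrations" ∧ PySem.Str.isIn "migrations" n = true)
      ∨ (x = "api:routes" ∧ (PySem.Str.isIn "/api/" n || PySem.Str.isIn "routes" n) = true)
      ∨ (x = "contracts:schema" ∧ PySem.Str.isIn "contract" n = true) := by
  unfold pvStep
  split_ifs <;> simp only [PySem.Set.mem_add] <;> tauto

theorem pv_mem_foldl (L : List String) (s : PySem.Set String) (x : String) :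
    x ∈ L.foldl pvStep s ↔ x ∈ s
      ∨ (x = "db:migrations" ∧ L.any (fun n => PySem.Str.isIn "migrations" n) = true)
      ∨ (x = "api:routes" ∧ L.any (fun n => PySem.Str.isIn "/api/" n || PySem.Str.isIn "routes" n) = true)
      ∨ (x = "contracts:schema" ∧ L.any (fun n => PySem.Str.isIn "contract" n) = true) := by
  induction L generalizing s with
  | nil => simp
  | cons a t ih =>
    simp only [List.foldl_cons, ih, pv_mem_step, List.any_cons, Bool.or_eq_true]
    tauto

-- filter-then-map = B's filterMap over the raw targets
theorem pv_texts_eq (xs : List String) :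
    xs.filterMap (fun item => if PySem.Str.strip item ≠ "" then some (PySem.Str.lower item) else none)
    = (xs.filter (fun item => PySem.Str.strip item ≠ "")).map PySem.Str.lower := by
  induction xs with
  | nil => rfl
  | cons a t ih =>
    by_cases h : PySem.Str.strip a = "" <;>
      simp only [List.filterMap_cons, List.filter_cons, ne_eq, h, not_true_eq_false, decide_false,
        not_false_eq_true, decide_true, if_false, if_true, Bool.false_eq_true, List.map_cons, ih]

-- the three tags in sorted order
theorem pv_pw3 : List.Pairwise (· < ·) (["api:routes", "contracts:schema", "db:migrations"] : List String) := by
  simp [List.pairwise_cons, String.lt_iff_toList_lt]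
  decide

-- perm + strict order ⇒ sorted of the fold is the given literal list
theorem pv_finish (L ys : List String) (hnd : ys.Nodup)
    (hpw : List.Pairwise (· < ·) ys)
    (hmem : ∀ x, x ∈ L.foldl pvStep PySem.Set.empty ↔ x ∈ ys) :
    PySem.List.sorted (L.foldl pvStep PySem.Set.empty) (fun x => x) false = ys :=
  PySem.List.sorted_eq_of_perm_of_pairwise_lt _ _ _
    ((List.perm_ext_iff_of_nodup hnd (pv_nodup_foldl L _ List.nodup_nil)).mpr
      (fun x => (hmem x).symm)) hpw

-- the heart: sorted(A's inferred set over lowered targets) = B's rule-table comprehension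
theorem pv_infer_eq (L : List String) :
    PySem.List.sorted (L.foldl pvStep PySem.Set.empty) (fun x => x) false
    = pvRules.filterMap (fun r =>
        if L.any (fun t => r.2.any (fun n => PySem.Str.isIn n t)) then some r.1 else none) := by
  by_cases h2 : L.any (fun t => PySem.Str.isIn "/api/" t || PySem.Str.isIn "routes" t) = true <;>
  by_cases h3 : L.any (fun t => PySem.Str.isIn "contract" t) = true <;>
  by_cases h1 : L.any (fun t => PySem.Str.isIn "migrations" t) = true <;>
  · simp only [pvRules, List.filterMap_cons, List.filterMap_nil, List.any_cons, List.any_nil,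
      Bool.or_false]
    simp only [h1, h2, h3, if_true, if_false, Bool.false_eq_true]
    refine pv_finish L _ (by decide) (pv_pw3.sublist (by decide)) ?_
    intro x
    rw [pv_mem_foldl]
    simp only [PySem.Set.empty, List.not_mem_nil, false_or, h1, h2, h3, and_true,
      List.mem_cons, or_false]
    tauto

theorem semantic_locks_py_eq_alt (slice_payload : List (String × List String)) :
    semantic_locks_py slice_payload = semantic_locks_py_alt slice_payload := by
  unfold semantic_locks_py semantic_locks_py_alt
  dsimp only
  split_ifs with h1
  · rfl
  · rw [pv_texts_eq,
      show pvLoopBody = (fun s t => pvStep s (PySem.Str.lower t)) from rfl,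
      ← List.foldl_map]
    exact pv_infer_eq _

-- ===== VERDICT (by name: the statement is the Claim_ definition above) =====
theorem semantic_locks_py_spec : Claim_equal_semantic_locks_py := by
  intro sp _
  exact semantic_locks_py_eq_alt sp
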